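-- pv_equiv track=rewrite | github.com/moguonyanko/algorithmer | python/algorithm.py | highestScore_V1
-- ===== SOURCE A (Python) =====
-- def highestScore_V1(friends):
-- 	rng = range(len(friends[0]))
-- 	friend_key = "Y"
--
-- 	max_friend_count = 0
-- 	for i in rng:
-- 		cnt = 0
--
-- 		for j in rng:
-- 			if i == j: continue #自分自身を友人として数えない。
--
-- 			if friends[i][j] == friend_key:
-- 				cnt += 1
-- 			else:
-- 				for k in rng:
-- 					if friends[j][k] == friend_key and friends[k][i] == friend_key:
-- 						cnt += 1
-- 						break
--
-- 		max_friend_count = max(max_friend_count, cnt)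
--
-- 	return max_friend_count
-- ===== SOURCE B (Python) =====
-- def highestScore_V1(friends):
--     n = len(friends[0])
--     rng = range(n)
--     # bitmask of outgoing 'Y' neighbours per row, and of incoming 'Y' per column
--     out = [sum(1 << k for k in rng if friends[j][k] == "Y") for j in rng]
--     inc = [sum(1 << k for k in rng if friends[k][i] == "Y") for i in rng]
--     best = 0
--     for i in rng:
--         cnt = sum(1 for j in rng
--                   if j != i and ((out[i] >> j) & 1 or out[j] & inc[i]))
--         best = max(best, cnt)
--     return best
-- ===== Notes on version B (the rewrite author's own statement) =====
-- stated objective: alternative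
-- what changed: Replaces A's per-pair inner scan over k (with break) by precomputed row/column neighbour bitmasks, so the two-hop test becomes one bitwise AND per pair.
-- outside the precondition, e.g. on highestScore_V1(['YY', 'Y']): A returns 1, B raises IndexError
import Mathlib
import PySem

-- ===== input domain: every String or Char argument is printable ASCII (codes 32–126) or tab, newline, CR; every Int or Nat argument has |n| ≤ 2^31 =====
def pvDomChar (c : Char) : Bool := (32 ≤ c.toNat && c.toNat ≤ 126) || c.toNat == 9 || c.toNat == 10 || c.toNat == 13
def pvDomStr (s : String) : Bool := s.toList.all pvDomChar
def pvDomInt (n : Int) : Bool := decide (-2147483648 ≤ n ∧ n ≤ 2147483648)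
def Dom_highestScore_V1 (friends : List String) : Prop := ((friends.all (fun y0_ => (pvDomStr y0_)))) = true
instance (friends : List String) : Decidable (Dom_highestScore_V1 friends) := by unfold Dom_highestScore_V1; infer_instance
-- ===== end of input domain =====

-- B replaces A's inner existential scan (O(n) with break, per pair) by precomputed row/column
-- neighbour bitmasks tested with a single bitwise AND per pair; an alternative algorithm.

-- ===== PORT A =====
-- shared access helpers: friends[r][c] and len(friends[0]); the .getD defaults are never
-- reached on inputs satisfying Pre_highestScore_V1 (all indexing is within the n×n prefix).
def pvGetc (friends : List String) (r c : Nat) : Char :=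
  ((PySem.Str.pyGet? ((PySem.List.pyGet? friends (r : Int)).getD "") (c : Int)).getD ' ')

def pvLen0 (friends : List String) : Nat :=
  ((PySem.List.pyGet? friends (0 : Int)).getD "").toList.length

def highestScore_V1 (friends : List String) : Int :=
  let n := pvLen0 friends
  (List.range n).foldl (fun max_friend_count i =>
    let cnt : Int := (List.range n).foldl (fun cnt j =>
      if i = j then cnt
      else if pvGetc friends i j = 'Y' then cnt + 1
      else if (List.range n).any (fun k =>
          pvGetc friends j k == 'Y' && pvGetc friends k i == 'Y') then cnt + 1
      else cnt) 0
    max max_friend_count cnt) 0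

-- ===== PORT B =====
def highestScore_V1_alt (friends : List String) : Int :=
  let n := pvLen0 friends
  let out := (List.range n).map (fun j =>
    (((List.range n).filter (fun k => pvGetc friends j k == 'Y')).map (fun k => (1 : Nat) <<< k)).sum)
  let inc := (List.range n).map (fun i =>
    (((List.range n).filter (fun k => pvGetc friends k i == 'Y')).map (fun k => (1 : Nat) <<< k)).sum)
  (List.range n).foldl (fun best i =>
    let cnt : Int := (((List.range n).filter (fun j =>
        (!(j == i)) && ((((out.getD i 0) >>> j) &&& 1 != 0) ||
                        ((out.getD j 0) &&& (inc.getD i 0) != 0)))).map (fun _ => (1 : Int))).sum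
    max best cnt) 0

-- ===== PRECONDITION & SPEC =====
-- Pre_ excludes the inputs where the Python A raises (empty list, or a row/entry accessed
-- beyond its length); it also excludes some ragged lists on which a 'Y' short-circuit lets A
-- return anyway (B then raises on the row it reads in full) — see the cite in the claim.
def Pre_highestScore_V1 (friends : List String) : Prop :=
  friends ≠ [] ∧
  (friends.headD "").toList.length ≤ friends.length ∧
  ∀ s ∈ friends.take ((friends.headD "").toList.length),
    (friends.headD "").toList.length ≤ s.toList.length
instance (friends : List String) : Decidable (Pre_highestScore_V1 friends) := by
  unfold Pre_highestScore_V1; infer_instance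

def pvWitness_highestScore_V1 : List String := ["YN", "NY"]

def Spec_highestScore_V1 (friends : List String) (out : Int) : Prop := out = highestScore_V1_alt friends
instance (friends : List String) (out : Int) : Decidable (Spec_highestScore_V1 friends out) := by unfold Spec_highestScore_V1; infer_instance

-- ===== CLAIM (what is proved, stated in full; the proofs are below) =====
def Claim_equal_highestScore_V1 : Prop := ∀ (friends : List String), Dom_highestScore_V1 friends → Pre_highestScore_V1 friends → Spec_highestScore_V1 friends (highestScore_V1 friends)

-- ===== LEMMAS AND PROOFS =====

-- sum of distinct powers of two: its bits are exactly the listed exponents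
def pvBits (l : List Nat) : Nat := (l.map (fun k => (1 : Nat) <<< k)).sum

theorem pvBits_dvd (a : Nat) (l : List Nat) (h : ∀ x ∈ l, a + 1 ≤ x) :
    2 ^ (a + 1) ∣ pvBits l := by
  induction l with
  | nil => simp [pvBits]
  | cons x xs ih =>
    simp only [pvBits, List.map_cons, List.sum_cons]
    refine Nat.dvd_add ?_ (ih (fun y hy => h y (by simp [hy])))
    rw [Nat.one_shiftLeft]
    exact pow_dvd_pow 2 (h x (by simp))

theorem pvBits_testBit (l : List Nat) (hs : l.Pairwise (· < ·)) (j : Nat) :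
    (pvBits l).testBit j = decide (j ∈ l) := by
  induction l with
  | nil => simp [pvBits]
  | cons a xs ih =>
    have ha : ∀ x ∈ xs, a + 1 ≤ x := fun x hx => (List.pairwise_cons.mp hs).1 x hx
    obtain ⟨m, hm⟩ := pvBits_dvd a xs ha
    have hlt : (1 : Nat) <<< a < 2 ^ (a + 1) := by
      rw [Nat.one_shiftLeft]; exact Nat.pow_lt_pow_succ (by norm_num)
    have h1 : pvBits (a :: xs) = 2 ^ (a + 1) * m + 1 <<< a := by
      simp only [pvBits, List.map_cons, List.sum_cons]
      rw [show (List.map (fun k => 1 <<< k) xs).sum = pvBits xs from rfl, hm]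
      omega
    have h2 : pvBits xs = 2 ^ (a + 1) * m + 0 := by omega
    rw [h1, Nat.testBit_two_pow_mul_add m hlt j]
    by_cases hj : j < a + 1
    · have hja : (1 <<< a).testBit j = decide (j = a) := by
        rw [Nat.one_shiftLeft, Nat.testBit_two_pow]
        by_cases h : a = j <;> simp [h, Ne.symm]
      have hnx : j ∉ xs := fun hx => by have := ha j hx; omega
      simp [hj, hja, hnx]
    · have := ih (List.pairwise_cons.mp hs).2
      rw [h2, Nat.testBit_two_pow_mul_add m (by positivity) j] at this
      simp only [if_neg hj] at this
      have hne : ¬ j = a := by omega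
      simp [hj, this, hne]

theorem pvAnd_ne_zero (a b : Nat) :
    (a &&& b ≠ 0) ↔ ∃ i, a.testBit i = true ∧ b.testBit i = true := by
  constructor
  · intro h
    by_contra hc
    push_neg at hc
    apply h
    apply Nat.eq_of_testBit_eq
    intro i
    have := hc i
    rw [Nat.testBit_and, Nat.zero_testBit]
    cases h1 : a.testBit i <;> cases h2 : b.testBit i <;> simp_all
  · rintro ⟨i, h1, h2⟩ h0
    have := congrArg (fun x => x.testBit i) h0
    simp [Nat.testBit_and, h1, h2] at this

theorem pvShift_and_one (x j : Nat) : ((x >>> j) &&& 1 != 0) = x.testBit j := by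
  rw [Nat.testBit, Nat.and_comm]

theorem pvGetD_map_range {α : Type} (f : Nat → α) (n j : Nat) (hj : j < n) (d : α) :
    (((List.range n).map f).getD j d) = f j := by
  rw [List.getD_eq_getElem?_getD]
  simp [List.getElem?_map, List.getElem?_range, hj]

theorem pvSum_map_one (l : List Nat) : ((l.map (fun _ => (1 : Int))).sum) = (l.length : Int) := by
  induction l with
  | nil => simp
  | cons x xs ih => simp [ih]; omega

theorem pvFoldl_count (p : Nat → Bool) (l : List Nat) (c : Int) :
    l.foldl (fun c j => if p j then c + 1 else c) c = c + (l.countP p : Int) := by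
  induction l generalizing c with
  | nil => simp
  | cons x xs ih =>
    by_cases h : p x <;> simp [h, ih, List.countP_cons] <;> omega

theorem pvRange_filter_pairwise (n : Nat) (p : Nat → Bool) :
    ((List.range n).filter p).Pairwise (· < ·) :=
  (List.pairwise_lt_range).sublist List.filter_sublist

-- the mask of row j / column i of the n×n prefix
def pvOutM (friends : List String) (n j : Nat) : Nat :=
  pvBits ((List.range n).filter (fun k => pvGetc friends j k == 'Y'))
def pvIncM (friends : List String) (n i : Nat) : Nat :=
  pvBits ((List.range n).filter (fun k => pvGetc friends k i == 'Y'))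

theorem pvOutM_testBit (friends : List String) (n j b : Nat) :
    (pvOutM friends n j).testBit b = (decide (b < n) && (pvGetc friends j b == 'Y')) := by
  rw [pvOutM, pvBits_testBit _ (pvRange_filter_pairwise n _) b]
  by_cases hb : b < n <;> by_cases hy : pvGetc friends j b = 'Y' <;>
    simp [List.mem_filter, List.mem_range, hb, hy]

theorem pvIncM_testBit (friends : List String) (n i b : Nat) :
    (pvIncM friends n i).testBit b = (decide (b < n) && (pvGetc friends b i == 'Y')) := by
  rw [pvIncM, pvBits_testBit _ (pvRange_filter_pairwise n _) b]
  by_cases hb : b < n <;> by_cases hy : pvGetc friends b i = 'Y' <;>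
    simp [List.mem_filter, List.mem_range, hb, hy]

-- B's per-pair test equals A's branch condition (within the n×n prefix)
theorem pvPred_eq (friends : List String) (n i j : Nat) (hi : i < n) (hj : j < n) :
    ((!(j == i)) && (((pvOutM friends n i >>> j) &&& 1 != 0) ||
                     (pvOutM friends n j &&& pvIncM friends n i != 0)))
    = ((!(i == j)) && ((pvGetc friends i j == 'Y') ||
        (List.range n).any (fun k => pvGetc friends j k == 'Y' && pvGetc friends k i == 'Y'))) := by
  have h1 : ((pvOutM friends n i >>> j) &&& 1 != 0) = (pvGetc friends i j == 'Y') := by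
    rw [pvShift_and_one, pvOutM_testBit]
    simp [hj]
  have h2 : (pvOutM friends n j &&& pvIncM friends n i != 0)
      = (List.range n).any (fun k => pvGetc friends j k == 'Y' && pvGetc friends k i == 'Y') := by
    rcases h : (List.range n).any (fun k => pvGetc friends j k == 'Y' && pvGetc friends k i == 'Y') with _ | _
    · have hz : ¬ (pvOutM friends n j &&& pvIncM friends n i ≠ 0) := by
        rw [pvAnd_ne_zero]
        rintro ⟨b, hb1, hb2⟩
        rw [pvOutM_testBit] at hb1
        rw [pvIncM_testBit] at hb2
        simp only [Bool.and_eq_true, decide_eq_true_eq, beq_iff_eq] at hb1 hb2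
        have hall := List.any_eq_false.mp h b (List.mem_range.mpr hb1.1)
        simp [hb1.2, hb2.2] at hall
      simpa using hz
    · obtain ⟨k, hk, hcond⟩ := List.any_eq_true.mp h
      rw [List.mem_range] at hk
      simp only [Bool.and_eq_true, beq_iff_eq] at hcond
      have : pvOutM friends n j &&& pvIncM friends n i ≠ 0 := by
        rw [pvAnd_ne_zero]
        exact ⟨k, by rw [pvOutM_testBit]; simp [hk, hcond.1],
                  by rw [pvIncM_testBit]; simp [hk, hcond.2]⟩
      simpa using this
  rw [h1, h2]
  have : (j == i) = (i == j) := by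
    by_cases h : i = j <;> simp [h, Ne.symm]
  rw [this]

theorem pvCnt_eq (friends : List String) (n i : Nat) (hi : i < n) :
    (List.range n).foldl (fun cnt j =>
      if i = j then cnt
      else if pvGetc friends i j = 'Y' then cnt + 1
      else if (List.range n).any (fun k =>
          pvGetc friends j k == 'Y' && pvGetc friends k i == 'Y') then cnt + 1
      else cnt) (0 : Int)
    = (((List.range n).filter (fun j =>
        (!(j == i)) && (((pvOutM friends n i >>> j) &&& 1 != 0) ||
                        (pvOutM friends n j &&& pvIncM friends n i != 0)))).map
        (fun _ => (1 : Int))).sum := by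
  rw [pvSum_map_one, ← List.countP_eq_length_filter]
  have hcongr : (List.range n).foldl (fun cnt j =>
      if i = j then cnt
      else if pvGetc friends i j = 'Y' then cnt + 1
      else if (List.range n).any (fun k =>
          pvGetc friends j k == 'Y' && pvGetc friends k i == 'Y') then cnt + 1
      else cnt) (0 : Int)
      = (List.range n).foldl (fun cnt j =>
        if ((!(j == i)) && (((pvOutM friends n i >>> j) &&& 1 != 0) ||
            (pvOutM friends n j &&& pvIncM friends n i != 0))) then cnt + 1 else cnt) (0 : Int) := by
    apply PySem.List.foldl_congr_mem
    intro acc j hjmem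
    have hj : j < n := List.mem_range.mp hjmem
    rw [pvPred_eq friends n i j hi hj]
    by_cases h1 : i = j
    · simp [h1]
    · by_cases h2 : pvGetc friends i j = 'Y'
      · simp [h1, h2, Ne.symm]
      · by_cases h3 : (List.range n).any (fun k =>
            pvGetc friends j k == 'Y' && pvGetc friends k i == 'Y') <;>
          simp [h1, h2, h3, Ne.symm]
  rw [hcongr, pvFoldl_count]
  simp

-- ===== VERDICT (by name: the statement is the Claim_ definition above) =====
theorem highestScore_V1_spec : Claim_equal_highestScore_V1 := by
  intro friends _ _
  unfold Spec_highestScore_V1 highestScore_V1 highestScore_V1_alt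
  apply PySem.List.foldl_congr_mem
  intro acc i himem
  have hi : i < pvLen0 friends := List.mem_range.mp himem
  simp only []
  congr 1
  rw [pvCnt_eq friends (pvLen0 friends) i hi]
  congr 2
  apply List.filter_congr
  intro j hjmem
  have hj : j < pvLen0 friends := List.mem_range.mp hjmem
  rw [pvGetD_map_range _ _ i hi, pvGetD_map_range _ _ j hj, pvGetD_map_range _ _ i hi]
  simp [pvOutM, pvIncM, pvBits]
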